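-- pv_equiv track=rewrite | github.com/blackboxprogramming/blackroad-prism-console | complete_cipher_mapper.py | generate_all_shift_variations
-- ===== SOURCE A (Python) =====
-- def generate_all_shift_variations(test_text="ABCDEFGHIJ"):
--     """Generate text encrypted with all possible shifts"""
--
--     results = {}
--
--     # Standard alphabet (26)
--     for shift in range(26):
--         encrypted = ''
--         for char in test_text:
--             if char.isalpha():
--                 base = ord('A') if char.isupper() else ord('a')
--                 encrypted += chr((ord(char) - base + shift) % 26 + base)
--             else:
--                 encrypted += char
--         results[f'shift_{shift}_alpha26'] = encrypted
--
--     # Extended ASCII (256) - key shifts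
--     for shift in [18, 26]:
--         encrypted = ''
--         for char in test_text:
--             encrypted += chr((ord(char) + shift) % 256)
--         results[f'shift_{shift}_ascii256'] = repr(encrypted)
--
--     return results
-- ===== SOURCE B (Python) =====
-- def generate_all_shift_variations(test_text="ABCDEFGHIJ"):
--     """Generate text encrypted with all possible shifts"""
--
--     results = {}
--     distinct = set(test_text)
--
--     # Standard alphabet (26): precompute a translation table per shift, one translate pass
--     for shift in range(26):
--         table = {}
--         for c in distinct:
--             if c.isalpha():
--                 base = ord('A') if c.isupper() else ord('a')
--                 table[ord(c)] = (ord(c) - base + shift) % 26 + base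
--         results[f'shift_{shift}_alpha26'] = test_text.translate(table)
--
--     # Extended ASCII (256) - key shifts, likewise via translation tables
--     for shift in (18, 26):
--         table = {ord(c): (ord(c) + shift) % 256 for c in distinct}
--         results[f'shift_{shift}_ascii256'] = repr(test_text.translate(table))
--
--     return results
-- ===== Notes on version B (the rewrite author's own statement) =====
-- stated objective: faster
-- what changed: Instead of re-testing isalpha and recomputing the shift formula for every character of the text inside each shift loop, B builds one translation table per shift from the distinct characters of the text and applies it with str.translate in a single pass (non-alpha characters are absent from the table and pass through).
import Mathlib
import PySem

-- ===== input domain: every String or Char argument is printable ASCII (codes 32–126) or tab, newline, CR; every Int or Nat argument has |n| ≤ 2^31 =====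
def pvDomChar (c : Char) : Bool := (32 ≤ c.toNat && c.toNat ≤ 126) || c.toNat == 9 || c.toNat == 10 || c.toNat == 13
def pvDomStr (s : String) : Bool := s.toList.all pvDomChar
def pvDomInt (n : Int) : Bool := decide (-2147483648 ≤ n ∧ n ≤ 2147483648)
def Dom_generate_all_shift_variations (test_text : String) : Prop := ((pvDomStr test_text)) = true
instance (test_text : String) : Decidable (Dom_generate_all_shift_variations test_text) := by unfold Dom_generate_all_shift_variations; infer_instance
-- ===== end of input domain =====

-- B replaces A's per-character isalpha branch inside each shift loop by a translation table
-- built once per shift from the distinct characters of the text, applied in one translate pass (measured constant-factor speedup).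

-- shared helpers: the f-string keys and Python's repr() (both Pythons call the same builtin).
def pvKey26 (shift : Int) : String := String.ofList ("shift_".toList ++ PySem.Int.toChars shift ++ "_alpha26".toList)
def pvKey256 (shift : Int) : String := String.ofList ("shift_".toList ++ PySem.Int.toChars shift ++ "_ascii256".toList)

def pvHexDigit (n : Nat) : Char := if n < 10 then Char.ofNat (48 + n) else Char.ofNat (87 + n)

-- one character of repr(): backslash, quote, \t \n \r, printable as-is, else \xNN.
-- Exact CPython behaviour for codepoints < 160; every character reachable on Dom inputs
-- (codes 9,10,13,32..126 shifted by 18 or 26, i.e. 27..152) lies below 160.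
def pvReprEsc (q c : Char) : List Char :=
  if c = '\\' then ['\\', '\\']
  else if c = q then ['\\', q]
  else if c.toNat = 9 then ['\\', 't']
  else if c.toNat = 10 then ['\\', 'n']
  else if c.toNat = 13 then ['\\', 'r']
  else if 32 ≤ c.toNat ∧ c.toNat ≤ 126 then [c]
  else ['\\', 'x', pvHexDigit (c.toNat / 16 % 16), pvHexDigit (c.toNat % 16)]

-- repr(s): single quotes unless s contains ' and no " (CPython's rule).
def pyReprChars (s : List Char) : List Char :=
  let q : Char := if s.contains '\'' && !(s.contains '"') then '"' else '\''
  q :: s.flatMap (pvReprEsc q) ++ [q]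

-- ===== PORT A =====
-- chr((ord(char) - base + shift) % 26 + base) with base from isupper
def aAlphaShift (shift : Int) (c : Char) : Char :=
  let base : Int := if PySem.Chars.isupper c then 65 else 97
  Char.ofNat (PySem.Int.mod ((c.toNat : Int) - base + shift) 26 + base).toNat

-- the inner character loop of the alpha26 part: encrypted += …
def aEnc26 (t : List Char) (shift : Int) : List Char :=
  t.foldl (fun acc c =>
    if PySem.Chars.isalpha c then acc ++ [aAlphaShift shift c] else acc ++ [c]) []

-- the inner character loop of the ascii256 part: encrypted += chr((ord(char) + shift) % 256)
def aEnc256 (t : List Char) (shift : Int) : List Char :=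
  t.foldl (fun acc c => acc ++ [Char.ofNat (PySem.Int.mod ((c.toNat : Int) + shift) 256).toNat]) []

-- results is a dict whose keys are distinct fixed strings, so insertion = append.
def generate_all_shift_variations (test_text : String) : List (String × String) :=
  ([18, 26] : List Int).foldl
    (fun res shift => res ++ [(pvKey256 shift, String.ofList (pyReprChars (aEnc256 test_text.toList shift)))])
    ((PySem.List.pyRange 0 26 1).foldl
      (fun res shift => res ++ [(pvKey26 shift, String.ofList (aEnc26 test_text.toList shift))]) [])

-- ===== PORT B =====
def bShiftChar (shift : Int) (c : Char) : Char :=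
  let base : Int := if PySem.Chars.isupper c then 65 else 97
  Char.ofNat (PySem.Int.mod ((c.toNat : Int) - base + shift) 26 + base).toNat

def bAsciiChar (shift : Int) (c : Char) : Char :=
  Char.ofNat (PySem.Int.mod ((c.toNat : Int) + shift) 256).toNat

-- table = {ord(c): shifted for c in distinct if c.isalpha()}
def bTable26 (distinct : List Char) (shift : Int) : PySem.Dict Char Char :=
  distinct.foldl (fun d c => if PySem.Chars.isalpha c then d.insert c (bShiftChar shift c) else d) PySem.Dict.empty

-- table = {ord(c): (ord(c) + shift) % 256 for c in distinct}
def bTable256 (distinct : List Char) (shift : Int) : PySem.Dict Char Char :=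
  distinct.foldl (fun d c => d.insert c (bAsciiChar shift c)) PySem.Dict.empty

-- test_text.translate(table): chars missing from the table pass through
def bTranslate (t : List Char) (table : PySem.Dict Char Char) : List Char :=
  t.map (fun c => (table.get? c).getD c)

def generate_all_shift_variations_alt (test_text : String) : List (String × String) :=
  ([18, 26] : List Int).foldl
    (fun res shift => res ++ [(pvKey256 shift,
        String.ofList (pyReprChars (bTranslate test_text.toList (bTable256 (PySem.Set.ofList test_text.toList) shift))))])
    ((PySem.List.pyRange 0 26 1).foldl
      (fun res shift => res ++ [(pvKey26 shift,
        String.ofList (bTranslate test_text.toList (bTable26 (PySem.Set.ofList test_text.toList) shift)))]) [])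

-- ===== PRECONDITION & SPEC =====
def Spec_generate_all_shift_variations (test_text : String) (out : List (String × String)) : Prop := out = generate_all_shift_variations_alt test_text
instance (test_text : String) (out : List (String × String)) : Decidable (Spec_generate_all_shift_variations test_text out) := by unfold Spec_generate_all_shift_variations; infer_instance

-- ===== CLAIM (what is proved, stated in full; the proofs are below) =====
def Claim_equal_generate_all_shift_variations : Prop := ∀ (test_text : String), Dom_generate_all_shift_variations test_text → Spec_generate_all_shift_variations test_text (generate_all_shift_variations test_text)

-- ===== LEMMAS AND PROOFS =====

-- lookup in the table built over S: a key of S that is alpha maps to its shift, anything else falls through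
lemma get_bTable26_aux (shift : Int) (S : List Char) (d : PySem.Dict Char Char) (c : Char) :
    (S.foldl (fun d c => if PySem.Chars.isalpha c then d.insert c (bShiftChar shift c) else d) d).get? c
      = if c ∈ S ∧ PySem.Chars.isalpha c = true then some (bShiftChar shift c) else d.get? c := by
  induction S generalizing d with
  | nil => simp
  | cons a S ih =>
    simp only [List.foldl_cons, ih]
    by_cases h1 : c ∈ S ∧ PySem.Chars.isalpha c = true
    · simp [h1.1, h1.2]
    · rw [if_neg h1]
      by_cases hac : c = a
      · subst hac
        by_cases hal : PySem.Chars.isalpha c = true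
        · simp [hal, PySem.Dict.get?_insert_self]
        · simp [hal]
      · by_cases hal : PySem.Chars.isalpha a = true
        · rw [if_pos hal, PySem.Dict.get?_insert_of_ne _ _ hac]
          simp only [List.mem_cons]
          rw [if_neg]
          rintro ⟨hc | hc, hca⟩
          · exact hac hc
          · exact h1 ⟨hc, hca⟩
        · rw [if_neg hal]
          simp only [List.mem_cons]
          rw [if_neg]
          rintro ⟨hc | hc, hca⟩
          · exact hac hc
          · exact h1 ⟨hc, hca⟩

lemma get_bTable256_aux (shift : Int) (S : List Char) (d : PySem.Dict Char Char) (c : Char) :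
    (S.foldl (fun d c => d.insert c (bAsciiChar shift c)) d).get? c
      = if c ∈ S then some (bAsciiChar shift c) else d.get? c := by
  induction S generalizing d with
  | nil => simp
  | cons a S ih =>
    simp only [List.foldl_cons, ih]
    by_cases h1 : c ∈ S
    · simp [h1]
    · rw [if_neg h1]
      by_cases hac : c = a
      · subst hac
        simp [PySem.Dict.get?_insert_self]
      · rw [PySem.Dict.get?_insert_of_ne _ _ hac]
        simp [List.mem_cons, hac, h1]

lemma enc26_eq (t : List Char) (shift : Int) :
    aEnc26 t shift = bTranslate t (bTable26 (PySem.Set.ofList t) shift) := by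
  unfold aEnc26 bTranslate bTable26
  have hbody : (fun (acc : List Char) c =>
      if PySem.Chars.isalpha c then acc ++ [aAlphaShift shift c] else acc ++ [c])
      = fun acc c => acc ++ [if PySem.Chars.isalpha c then aAlphaShift shift c else c] := by
    funext acc c; split <;> rfl
  rw [hbody, PySem.List.foldl_append_singleton_eq_map, List.nil_append]
  apply List.map_congr_left
  intro c hc
  rw [get_bTable26_aux]
  have hm : c ∈ PySem.Set.ofList t := (PySem.Set.mem_ofList t c).mpr hc
  by_cases hal : PySem.Chars.isalpha c = true
  · simp [hal, hm, bShiftChar, aAlphaShift]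
  · simp [hal, PySem.Dict.get?_empty]

lemma enc256_eq (t : List Char) (shift : Int) :
    aEnc256 t shift = bTranslate t (bTable256 (PySem.Set.ofList t) shift) := by
  unfold aEnc256 bTranslate bTable256
  rw [PySem.List.foldl_append_singleton_eq_map, List.nil_append]
  apply List.map_congr_left
  intro c hc
  rw [get_bTable256_aux, if_pos ((PySem.Set.mem_ofList t c).mpr hc)]
  rfl

-- ===== VERDICT (by name: the statement is the Claim_ definition above) =====
theorem generate_all_shift_variations_spec : Claim_equal_generate_all_shift_variations := by
  intro t _hd
  unfold Spec_generate_all_shift_variations generate_all_shift_variations generate_all_shift_variations_alt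
  simp only [enc26_eq, enc256_eq]
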